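-- pv_equiv track=rewrite | github.com/SteveWang7596/Part_of_speech-tagging-with-HMM | statistics.py | get_trigram_counts
-- ===== SOURCE A (Python) =====
-- def get_tags(dataset):
--   """Return list of all unique tags (including the special tags START and STOP) in the provided dataset."""
--   tags = ["START", "STOP"]
--   for sentence in dataset:
--     sentence_tags = sentence["tags"]
--     for tag in sentence_tags:
--       if tag not in tags:
--         tags.append(tag)
--   return tags
--
-- def get_trigram_counts(dataset):
--   """Return trigram tag counts, and word-tag pair counts in the provided dataset."""
--   #initialise trigram_tag_count to 0
--   tags = get_tags(dataset)
--   tags.append("UNKNOWN")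
--   trigram_tags_counts = {}
--   for tri_tag_0 in tags:
--     trigram_tags_counts[tri_tag_0] = {}
--     for tri_tag_1 in tags:
--       trigram_tags_counts[tri_tag_0][tri_tag_1] = {}
--       for tri_tag_2 in tags:
--         trigram_tags_counts[tri_tag_0][tri_tag_1][tri_tag_2] = 0
--   for sentence in dataset:
--     sentence_tags = sentence["tags"]
--     tag_0 = "START"
--     for i in range(len(sentence_tags)):
--       tag_1 = sentence_tags[i]
--       if i < (len(sentence_tags)-1):
--         tag_2 = sentence_tags[i+1]
--       else:
--         tag_2 = "STOP"
--       trigram_tags_counts[tag_0][tag_1][tag_2] += 1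
--       tag_0 = tag_1
--   return trigram_tags_counts
-- ===== SOURCE B (Python) =====
-- def get_trigram_counts(dataset):
--   """Return trigram tag counts, and word-tag pair counts in the provided dataset."""
--   # one flat stream of trigrams over the START/STOP-padded tag sequence of each sentence
--   tris = [tri for sentence in dataset
--           for p in [["START"] + list(sentence["tags"]) + ["STOP"]]
--           for tri in zip(p, p[1:], p[2:])]
--   all_tags = list(dict.fromkeys(
--       ["START", "STOP"] + [t for s in dataset for t in s["tags"]])) + ["UNKNOWN"]
--   # partition refinement: narrow the trigram stream tag by tag, count at the leaves
--   result = {}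
--   for t0 in all_tags:
--     bucket0 = [tri for tri in tris if tri[0] == t0]
--     row = {}
--     for t1 in all_tags:
--       bucket1 = [tri for tri in bucket0 if tri[1] == t1]
--       row[t1] = {t2: len([tri for tri in bucket1 if tri[2] == t2]) for t2 in all_tags}
--     result[t0] = row
--   return result
-- ===== Notes on version B (the rewrite author's own statement) =====
-- stated objective: alternative
-- what changed: A pre-fills a dense nested dict with zeros and increments cells in place while threading the previous tag through an index loop; B builds one flat stream of trigrams from the padded sequences and produces each cell by partition refinement - filtering the stream by tag_0, then by tag_1, then counting matches of tag_2 - with no mutable count table at all.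
import Mathlib
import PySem

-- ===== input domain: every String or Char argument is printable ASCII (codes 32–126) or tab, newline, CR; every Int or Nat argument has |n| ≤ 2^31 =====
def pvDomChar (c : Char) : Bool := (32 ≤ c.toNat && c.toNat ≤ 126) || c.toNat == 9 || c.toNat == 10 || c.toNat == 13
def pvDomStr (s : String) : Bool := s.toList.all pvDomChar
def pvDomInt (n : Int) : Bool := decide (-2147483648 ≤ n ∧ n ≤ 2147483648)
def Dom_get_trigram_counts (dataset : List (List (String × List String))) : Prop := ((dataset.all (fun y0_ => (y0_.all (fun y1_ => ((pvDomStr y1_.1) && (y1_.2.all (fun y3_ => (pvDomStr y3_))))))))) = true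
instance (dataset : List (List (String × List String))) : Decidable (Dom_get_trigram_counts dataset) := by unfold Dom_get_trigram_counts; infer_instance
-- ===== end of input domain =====

-- B replaces A's init-dense-zeros-then-increment-in-place table by partition refinement over one
-- flat trigram stream: filter by tag_0, then tag_1, then count tag_2 matches at the leaves
-- (objective: alternative — no mutable count table; same result, different decomposition).

-- ===== PORT A =====
-- sentence["tags"] — Pre_ guarantees the key is present, so getD's default is never consulted
-- (on a sentence without the key Python raises KeyError; those inputs are outside Pre_).
def pvSentTags (sentence : List (String × List String)) : List String :=
  (PySem.Dict.mk sentence).getD "tags" []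

def get_trigram_counts (dataset : List (List (String × List String))) : List (String × List (String × List (String × Int))) :=
  -- get_tags(dataset), then tags.append("UNKNOWN")
  let tags : List String :=
    (dataset.foldl (fun tags sentence =>
      (pvSentTags sentence).foldl
        (fun tags tag => if tag ∈ tags then tags else tags ++ [tag]) tags)
      ["START", "STOP"]) ++ ["UNKNOWN"]
  -- initialise trigram_tag_count to 0; Python fills d[a][b][c] in place, and each d[a] (resp.
  -- d[a][b]) is the freshly created {} of the current iteration, so the in-place fills are
  -- exactly these local builds of the inner dicts
  let init : PySem.Dict String (PySem.Dict String (PySem.Dict String Int)) :=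
    tags.foldl (fun d tri_tag_0 => d.insert tri_tag_0 (
      tags.foldl (fun da tri_tag_1 => da.insert tri_tag_1 (
        tags.foldl (fun db tri_tag_2 => db.insert tri_tag_2 0)
          PySem.Dict.empty)) PySem.Dict.empty)) PySem.Dict.empty
  -- counting loop; trigram_tags_counts[tag_0][tag_1][tag_2] += 1 is Dict.modify along the path
  -- (the three keys are always present, so Python's KeyError-free increment is exact)
  let final := dataset.foldl (fun d sentence =>
    let sentence_tags := pvSentTags sentence
    ((PySem.List.pyRange 0 (PySem.List.len sentence_tags) 1).foldl
      (fun (s : PySem.Dict String (PySem.Dict String (PySem.Dict String Int)) × String) i =>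
        let tag_1 := PySem.List.pyGetD sentence_tags i ""
        let tag_2 := if i < PySem.List.len sentence_tags - 1
                     then PySem.List.pyGetD sentence_tags (i + 1) "" else "STOP"
        (s.1.modify s.2 PySem.Dict.empty (fun da =>
           da.modify tag_1 PySem.Dict.empty (fun db =>
             db.modify tag_2 0 (· + 1))), tag_1))
      (d, "START")).1) init
  -- render the nested dicts as the association lists of the type convention
  final.items.map (fun p => (p.1, p.2.items.map (fun q => (q.1, q.2.items))))

-- ===== PORT B =====
def get_trigram_counts_alt (dataset : List (List (String × List String))) : List (String × List (String × List (String × Int))) :=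
  -- tris: the flat trigram stream over zip(p, p[1:], p[2:]) of each padded sequence
  let tris : List (String × String × String) :=
    dataset.flatMap (fun sentence =>
      let p := ["START"] ++ pvSentTags sentence ++ ["STOP"]
      p.zip ((PySem.List.slice p (some 1)).zip (PySem.List.slice p (some 2))))
  -- all_tags = list(dict.fromkeys(["START","STOP"] + flat)) + ["UNKNOWN"]
  let all_tags : List String :=
    PySem.List.dedup (["START", "STOP"] ++ dataset.flatMap (fun s => pvSentTags s)) ++ ["UNKNOWN"]
  -- partition refinement (the comprehensions bucket0/bucket1 inlined as the filters they are)
  ((all_tags.foldl (fun result t0 =>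
      result.insert t0 (
        all_tags.foldl (fun row t1 =>
          row.insert t1 (
            all_tags.foldl (fun d2 t2 =>
              d2.insert t2 ((((tris.filter (fun tri => tri.1 == t0)).filter
                  (fun tri => tri.2.1 == t1)).filter (fun tri => tri.2.2 == t2)).length : Int))
              PySem.Dict.empty)) PySem.Dict.empty)) PySem.Dict.empty).items).map
    (fun p => (p.1, p.2.items.map (fun q => (q.1, q.2.items))))

-- ===== PRECONDITION & SPEC =====
-- Pre_: every sentence dict carries the key "tags"; on a sentence without it both Pythons raise KeyError.
def Pre_get_trigram_counts (dataset : List (List (String × List String))) : Prop :=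
  ∀ s ∈ dataset, "tags" ∈ s.map Prod.fst
instance (dataset : List (List (String × List String))) : Decidable (Pre_get_trigram_counts dataset) := by unfold Pre_get_trigram_counts; infer_instance

def pvWitness_get_trigram_counts : (List (List (String × List String))) :=
  [[("tags", ["N", "V"])], [("tags", ["N"])]]

def Spec_get_trigram_counts (dataset : List (List (String × List String))) (out : List (String × List (String × List (String × Int)))) : Prop := out = get_trigram_counts_alt dataset
instance (dataset : List (List (String × List String))) (out : List (String × List (String × List (String × Int)))) : Decidable (Spec_get_trigram_counts dataset out) := by unfold Spec_get_trigram_counts; infer_instance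

-- ===== CLAIM (what is proved, stated in full; the proofs are below) =====
def Claim_equal_get_trigram_counts : Prop := ∀ (dataset : List (List (String × List String))), Dom_get_trigram_counts dataset → Pre_get_trigram_counts dataset → Spec_get_trigram_counts dataset (get_trigram_counts dataset)

-- ===== LEMMAS AND PROOFS =====

theorem pv_foldl_insert_fun {α β : Type} [BEq α] [LawfulBEq α] (f : α → β) (l : List α) :
    (l.foldl (fun d a => d.insert a (f a)) PySem.Dict.empty)
      = PySem.Dict.mk ((PySem.List.dedup l).map (fun a => (a, f a))) := by
  induction l using List.reverseRecOn with
  | nil => rfl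
  | append_singleton l x ih =>
    have hrhs : PySem.List.dedup (l ++ [x])
        = if x ∈ PySem.List.dedup l then PySem.List.dedup l else PySem.List.dedup l ++ [x] := by
      rw [PySem.List.dedup_eq_ofList, PySem.Set.ofList_append_singleton, PySem.Set.add_eq_ite,
          ← PySem.List.dedup_eq_ofList]
    rw [List.foldl_append, List.foldl_cons, List.foldl_nil, ih, hrhs]
    by_cases hx : x ∈ PySem.List.dedup l
    · rw [if_pos hx]
      have hc : (PySem.Dict.mk ((PySem.List.dedup l).map (fun a => (a, f a)))).contains x = true := by
        rw [PySem.Dict.contains_iff_mem_keys, PySem.Dict.keys_mk]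
        simpa using hx
      apply PySem.Dict.ext
      rw [PySem.Dict.items_insert_of_contains _ _ hc]
      show List.map _ (List.map _ _) = _
      rw [List.map_map]
      apply List.map_congr_left
      intro a _
      by_cases hax : a = x
      · simp [hax]
      · simp [Function.comp, hax]
    · rw [if_neg hx]
      have hc : (PySem.Dict.mk ((PySem.List.dedup l).map (fun a => (a, f a)))).contains x = false := by
        rw [← Bool.not_eq_true, PySem.Dict.contains_iff_mem_keys, PySem.Dict.keys_mk]
        simpa using hx
      apply PySem.Dict.ext
      rw [PySem.Dict.items_insert_of_not_contains _ _ hc]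
      simp

def pvBump (d : PySem.Dict String (PySem.Dict String (PySem.Dict String Int)))
    (t0 t1 t2 : String) : PySem.Dict String (PySem.Dict String (PySem.Dict String Int)) :=
  d.modify t0 PySem.Dict.empty (fun da =>
    da.modify t1 PySem.Dict.empty (fun db => db.modify t2 0 (· + 1)))

def pvRep (U : List String) (d : PySem.Dict String (PySem.Dict String (PySem.Dict String Int)))
    (N : String → String → String → Int) : Prop :=
  d.keys = U ∧
  (∀ a ∈ U, (d.getD a PySem.Dict.empty).keys = U) ∧
  (∀ a ∈ U, ∀ b ∈ U, ((d.getD a PySem.Dict.empty).getD b PySem.Dict.empty).keys = U) ∧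
  (∀ a ∈ U, ∀ b ∈ U, ∀ c ∈ U,
    (((d.getD a PySem.Dict.empty).getD b PySem.Dict.empty)).getD c 0 = N a b c)

theorem pv_keys_modify_mem {ν : Type} {d : PySem.Dict String ν} {k : String} (d0 : ν) (f : ν → ν)
    (hk : k ∈ d.keys) : (d.modify k d0 f).keys = d.keys := by
  rw [PySem.Dict.keys_modify, PySem.Dict.keys_insert_of_contains]
  rw [PySem.Dict.contains_iff_mem_keys]; exact hk

theorem pv_bump_rep {U : List String} {d N} {a0 b0 c0 : String}
    (ha : a0 ∈ U) (hb : b0 ∈ U) (hc : c0 ∈ U) (h : pvRep U d N) :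
    pvRep U (pvBump d a0 b0 c0)
      (fun x y z => if x = a0 ∧ y = b0 ∧ z = c0 then N x y z + 1 else N x y z) := by
  obtain ⟨h1, h2, h3, h4⟩ := h
  have hka : a0 ∈ d.keys := h1 ▸ ha
  refine ⟨?_, ?_, ?_, ?_⟩
  · rw [pvBump, pv_keys_modify_mem _ _ hka, h1]
  · intro a haU
    rw [pvBump, PySem.Dict.getD_modify]
    by_cases hax : a = a0
    · subst hax
      rw [if_pos rfl, pv_keys_modify_mem _ _ ((h2 a ha) ▸ hb)]
      exact h2 a haU
    · rw [if_neg hax]; exact h2 a haU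
  · intro a haU b hbU
    rw [pvBump, PySem.Dict.getD_modify]
    by_cases hax : a = a0
    · subst hax
      rw [if_pos rfl, PySem.Dict.getD_modify]
      by_cases hbx : b = b0
      · subst hbx
        rw [if_pos rfl, pv_keys_modify_mem _ _ ((h3 a ha b hb) ▸ hc)]
        exact h3 a haU b hbU
      · rw [if_neg hbx]; exact h3 a haU b hbU
    · rw [if_neg hax]; exact h3 a haU b hbU
  · intro a haU b hbU c hcU
    show (((pvBump d a0 b0 c0).getD a PySem.Dict.empty).getD b PySem.Dict.empty).getD c 0
      = if a = a0 ∧ b = b0 ∧ c = c0 then N a b c + 1 else N a b c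
    rw [pvBump, PySem.Dict.getD_modify]
    by_cases hax : a = a0
    · subst hax
      rw [if_pos rfl, PySem.Dict.getD_modify]
      by_cases hbx : b = b0
      · subst hbx
        rw [if_pos rfl, PySem.Dict.getD_modify]
        by_cases hcx : c = c0
        · subst hcx
          rw [if_pos rfl, if_pos ⟨rfl, rfl, rfl⟩, h4 a haU b hbU c hcU]
        · rw [if_neg hcx, if_neg (by tauto)]; exact h4 a haU b hbU c hcU
      · rw [if_neg hbx, if_neg (by tauto)]; exact h4 a haU b hbU c hcU
    · rw [if_neg hax, if_neg (by tauto)]; exact h4 a haU b hbU c hcU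

theorem pvRep_congr {U : List String} {d N N'} (h : ∀ x y z, N x y z = N' x y z)
    (hd : pvRep U d N) : pvRep U d N' := by
  obtain ⟨h1, h2, h3, h4⟩ := hd
  exact ⟨h1, h2, h3, fun a ha b hb c hc => (h4 a ha b hb c hc).trans (h a b c)⟩

theorem pv_foldl_bump_rep {U : List String}
    (tris : List (String × String × String)) (d : PySem.Dict String (PySem.Dict String (PySem.Dict String Int)))
    (N : String → String → String → Int)
    (hm : ∀ t ∈ tris, t.1 ∈ U ∧ t.2.1 ∈ U ∧ t.2.2 ∈ U) (h : pvRep U d N) :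
    pvRep U (tris.foldl (fun d t => pvBump d t.1 t.2.1 t.2.2) d)
      (fun x y z => N x y z + (tris.count (x, y, z) : Int)) := by
  induction tris generalizing d N with
  | nil => simpa using pvRep_congr (by intro x y z; simp) h
  | cons t rest ih =>
    obtain ⟨ht1, ht2, ht3⟩ := hm t (List.mem_cons_self ..)
    have step := pv_bump_rep ht1 ht2 ht3 h
    have := ih _ _ (fun u hu => hm u (List.mem_cons_of_mem _ hu)) step
    refine pvRep_congr ?_ this
    intro x y z
    by_cases hxt : (x, y, z) = t
    · have : x = t.1 ∧ y = t.2.1 ∧ z = t.2.2 := by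
        obtain ⟨t1, t2, t3⟩ := t; simp_all
      rw [if_pos this, List.count_cons, if_pos (by exact beq_iff_eq.mpr hxt.symm)]
      push_cast; ring
    · have : ¬ (x = t.1 ∧ y = t.2.1 ∧ z = t.2.2) := by
        obtain ⟨t1, t2, t3⟩ := t; simp_all
      rw [if_neg this, List.count_cons, if_neg (by simpa using fun e => hxt e.symm)]
      push_cast; ring

def pvHead2 : List String → String
  | [] => "STOP"
  | y :: _ => y

def pvTriList : String → List String → List (String × String × String)
  | _, [] => []
  | t0, x :: r => (t0, x, pvHead2 r) :: pvTriList x r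

theorem pv_triList_mem {t : String × String × String} :
    ∀ (t0 : String) (l : List String), t ∈ pvTriList t0 l →
      (t.1 = t0 ∨ t.1 ∈ l) ∧ t.2.1 ∈ l ∧ (t.2.2 ∈ l ∨ t.2.2 = "STOP") := by
  intro t0 l
  induction l generalizing t0 with
  | nil => simp [pvTriList]
  | cons x r ih =>
    intro ht
    rw [pvTriList] at ht
    rcases List.mem_cons.mp ht with h | h
    · subst h
      refine ⟨Or.inl rfl, by simp, ?_⟩
      cases r with
      | nil => right; rfl
      | cons y r' => left; simp [pvHead2]
    · obtain ⟨c1, c2, c3⟩ := ih x h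
      refine ⟨Or.inr ?_, by simp [c2], ?_⟩
      · rcases c1 with h1 | h1 <;> simp [h1]
      · rcases c3 with h3 | h3
        · left; simp [h3]
        · right; exact h3

theorem pv_zip_triList (t0 : String) (l : List String) :
    ((t0 :: (l ++ ["STOP"])).zip ((l ++ ["STOP"]).zip ((l ++ ["STOP"]).drop 1)))
      = pvTriList t0 l := by
  induction l generalizing t0 with
  | nil => simp [pvTriList]
  | cons x r ih =>
    cases r with
    | nil => simp [pvTriList, pvHead2, List.zip]
    | cons y r' =>
      show (t0, x, y) :: _ = _
      rw [pvTriList]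
      congr 1
      exact ih x

theorem pv_loopA (l : List String) : ∀ (k : Nat), k ≤ l.length →
    ∀ (d : PySem.Dict String (PySem.Dict String (PySem.Dict String Int))) (t0 : String),
    ((PySem.List.pyRange (k : Int) (PySem.List.len l) 1).foldl
      (fun (s : PySem.Dict String (PySem.Dict String (PySem.Dict String Int)) × String) i =>
        let tag_1 := PySem.List.pyGetD l i ""
        let tag_2 := if i < PySem.List.len l - 1
                     then PySem.List.pyGetD l (i + 1) "" else "STOP"
        (pvBump s.1 s.2 tag_1 tag_2, tag_1))
      (d, t0)).1
    = (pvTriList t0 (l.drop k)).foldl (fun d t => pvBump d t.1 t.2.1 t.2.2) d := by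
  intro k
  induction hn : l.length - k generalizing k with
  | zero =>
    intro hk d t0
    have hk' : k = l.length := by omega
    rw [PySem.List.pyRange_one_eq_nil (by rw [PySem.List.len_eq]; omega)]
    rw [hk', List.drop_length]
    rfl
  | succ n ih =>
    intro hk d t0
    have hkl : k < l.length := by omega
    rw [PySem.List.pyRange_one_cons (by rw [PySem.List.len_eq]; exact_mod_cast hkl)]
    rw [List.foldl_cons]
    have e1 : PySem.List.pyGetD l (k : Int) "" = l[k] := by
      rw [PySem.List.pyGetD_eq_getElem l "" (by positivity) (by exact_mod_cast hkl)]
      simp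
    have hdrop : l.drop k = l[k] :: l.drop (k + 1) := List.drop_eq_getElem_cons hkl
    have e2 : (if (k : Int) < PySem.List.len l - 1
        then PySem.List.pyGetD l ((k : Int) + 1) "" else "STOP") = pvHead2 (l.drop (k + 1)) := by
      by_cases h2 : k + 1 < l.length
      · rw [if_pos (by rw [PySem.List.len_eq]; omega)]
        have : ((k : Int) + 1) = ((k + 1 : Nat) : Int) := by push_cast; ring
        rw [this, PySem.List.pyGetD_eq_getElem l "" (by positivity) (by exact_mod_cast h2)]
        rw [List.drop_eq_getElem_cons h2]
        simp [pvHead2]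
      · rw [if_neg (by rw [PySem.List.len_eq]; omega)]
        have : l.drop (k + 1) = [] := List.drop_eq_nil_of_le (by omega)
        rw [this]; rfl
    show ((PySem.List.pyRange ((k : Int) + 1) (PySem.List.len l) 1).foldl _
        (pvBump d t0 (PySem.List.pyGetD l (k : Int) "") _, PySem.List.pyGetD l (k : Int) "")).1 = _
    have hcast : ((k : Int) + 1) = ((k + 1 : Nat) : Int) := by push_cast; ring
    rw [e1, hdrop, pvTriList, List.foldl_cons, e2, hcast]
    exact ih (k + 1) (by omega) (by omega) _ _

theorem pv_ds_rep {U : List String} (g : List (String × List String) → List (String × String × String)) :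
    ∀ (ds : List (List (String × List String))) (d : PySem.Dict String (PySem.Dict String (PySem.Dict String Int)))
      (N : String → String → String → Int),
    (∀ s ∈ ds, ∀ t ∈ g s, t.1 ∈ U ∧ t.2.1 ∈ U ∧ t.2.2 ∈ U) → pvRep U d N →
    pvRep U (ds.foldl (fun d s => (g s).foldl (fun d t => pvBump d t.1 t.2.1 t.2.2) d) d)
      (fun x y z => N x y z + ((ds.flatMap g).count (x, y, z) : Int)) := by
  intro ds
  induction ds with
  | nil => intro d N _ h; simpa using pvRep_congr (by intro x y z; simp) h
  | cons s rest ih =>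
    intro d N hm h
    rw [List.foldl_cons]
    have h1 := pv_foldl_bump_rep (g s) d N (hm s (List.mem_cons_self ..)) h
    have h2 := ih _ _ (fun u hu => hm u (List.mem_cons_of_mem _ hu)) h1
    refine pvRep_congr ?_ h2
    intro x y z
    rw [List.flatMap_cons, List.count_append]
    push_cast; ring

theorem pv_inner_fold (l : List String) (s : PySem.Set String) :
    l.foldl (fun tags tag => if tag ∈ tags then tags else tags ++ [tag]) s
      = PySem.Set.update s l := by
  induction l generalizing s with
  | nil => rfl
  | cons x r ih =>
    rw [List.foldl_cons, PySem.Set.update_cons, ← ih, PySem.Set.add_eq_ite]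

theorem pv_tags_fold (ds : List (List (String × List String))) (g : List (String × List String) → List String) :
    ∀ (s : PySem.Set String),
    ds.foldl (fun tags sentence =>
        (g sentence).foldl (fun tags tag => if tag ∈ tags then tags else tags ++ [tag]) tags) s
      = PySem.Set.update s (ds.flatMap g) := by
  induction ds with
  | nil => intro s; rfl
  | cons x r ih =>
    intro s
    rw [List.foldl_cons, List.flatMap_cons, PySem.Set.update_append, pv_inner_fold, ih]

theorem pv_rep_mk (U : List String) (hU : U.Nodup) (f : String → String → String → Int) :
    pvRep U (PySem.Dict.mk (U.map (fun a => (a,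
      PySem.Dict.mk (U.map (fun b => (b,
        PySem.Dict.mk (U.map (fun c => (c, f a b c)))))))))) f := by
  have hkeys : ∀ {ν : Type} (v : String → ν),
      (PySem.Dict.mk (U.map (fun a => (a, v a)))).keys = U := by
    intro ν v
    rw [PySem.Dict.keys_mk, List.map_map]
    exact List.map_id' U
  have hgetD : ∀ {ν : Type} (v : String → ν) (d0 : ν), ∀ a ∈ U,
      (PySem.Dict.mk (U.map (fun a => (a, v a)))).getD a d0 = v a := by
    intro ν v d0 a ha
    exact PySem.Dict.getD_of_mem_items (PySem.Dict.mk (U.map (fun a => (a, v a))))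
      (k := a) (v := v a) (List.mem_map.mpr ⟨a, ha, rfl⟩) (by rw [hkeys]; exact hU) d0
  refine ⟨hkeys _, ?_, ?_, ?_⟩
  · intro a ha; rw [hgetD _ _ a ha, hkeys]
  · intro a ha b hb; rw [hgetD _ _ a ha, hgetD _ _ b hb, hkeys]
  · intro a ha b hb c hc; rw [hgetD _ _ a ha, hgetD _ _ b hb, hgetD _ _ c hc]

theorem pv_render (U : List String) (hU : U.Nodup)
    (d : PySem.Dict String (PySem.Dict String (PySem.Dict String Int)))
    (f : String → String → String → Int) (h : pvRep U d f) :
    d.items.map (fun p => (p.1, p.2.items.map (fun q => (q.1, q.2.items))))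
      = U.map (fun a => (a, U.map (fun b => (b, U.map (fun c => (c, f a b c)))))) := by
  obtain ⟨h1, h2, h3, h4⟩ := h
  rw [PySem.Dict.items_eq_map_keys d (h1 ▸ hU) PySem.Dict.empty, h1, List.map_map]
  refine List.map_congr_left ?_
  intro a ha
  simp only [Function.comp]
  congr 1
  rw [PySem.Dict.items_eq_map_keys _ ((h2 a ha) ▸ hU) PySem.Dict.empty, h2 a ha, List.map_map]
  refine List.map_congr_left ?_
  intro b hb
  simp only [Function.comp]
  congr 1
  rw [PySem.Dict.items_eq_map_keys _ ((h3 a ha b hb) ▸ hU) 0, h3 a ha b hb]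
  refine List.map_congr_left ?_
  intro c hc
  rw [h4 a ha b hb c hc]

-- partition refinement counts: filtering by the three components then taking the length
-- is exactly counting the triple
theorem pv_fff (l : List (String × String × String)) (a b c : String) :
    (((l.filter (fun t => t.1 == a)).filter (fun t => t.2.1 == b)).filter
        (fun t => t.2.2 == c)).length = l.count (a, b, c) := by
  induction l with
  | nil => rfl
  | cons t rest ih =>
    obtain ⟨x, y, z⟩ := t
    by_cases hx : x = a <;> by_cases hy : y = b <;> by_cases hz : z = c <;>
      simp [hx, hy, hz, ih, Prod.ext_iff, -List.filter_filter]

theorem pv_main (ds : List (List (String × List String))) :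
    get_trigram_counts ds = get_trigram_counts_alt ds := by
  unfold get_trigram_counts get_trigram_counts_alt
  set flat := ds.flatMap (fun s => pvSentTags s) with hflat
  set G := PySem.Set.update ["START", "STOP"] flat with hG
  have hA_tags : (ds.foldl (fun tags sentence =>
      (pvSentTags sentence).foldl
        (fun tags tag => if tag ∈ tags then tags else tags ++ [tag]) tags)
      ["START", "STOP"]) = G := pv_tags_fold ds _ _
  have hB_tags : PySem.List.dedup (["START", "STOP"] ++ flat) = G := by
    rw [PySem.List.dedup_eq_ofList, PySem.Set.ofList_append,
        PySem.Set.ofList_eq_self_of_nodup _ (by decide)]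
  rw [hA_tags, hB_tags]
  -- B's trigram stream is the flatMap of the per-sentence trigram lists
  have hsl2 : ∀ (p : List String), PySem.List.slice p (some 2) = p.drop 2 := fun p => by
    simpa using PySem.List.slice_from_natCast p 2
  have htris : (ds.flatMap (fun sentence =>
      let p := ["START"] ++ pvSentTags sentence ++ ["STOP"]
      p.zip ((PySem.List.slice p (some 1)).zip (PySem.List.slice p (some 2)))))
      = ds.flatMap (fun s => pvTriList "START" (pvSentTags s)) := by
    refine List.flatMap_congr ?_
    intro sentence _
    show (["START"] ++ pvSentTags sentence ++ ["STOP"]).zip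
        ((PySem.List.slice (["START"] ++ pvSentTags sentence ++ ["STOP"]) (some 1)).zip
          (PySem.List.slice (["START"] ++ pvSentTags sentence ++ ["STOP"]) (some 2))) = _
    rw [PySem.List.slice_from_one, hsl2]
    rw [show (["START"] ++ pvSentTags sentence ++ ["STOP"])
          = "START" :: (pvSentTags sentence ++ ["STOP"]) from rfl]
    rw [show ("START" :: (pvSentTags sentence ++ ["STOP"])).tail
          = pvSentTags sentence ++ ["STOP"] from rfl,
        show ("START" :: (pvSentTags sentence ++ ["STOP"])).drop 2
          = (pvSentTags sentence ++ ["STOP"]).drop 1 from rfl]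
    rw [pv_zip_triList]
  rw [htris]
  simp only [pv_foldl_insert_fun]
  set U := PySem.List.dedup (G ++ ["UNKNOWN"]) with hU_def
  have hU : U.Nodup := PySem.List.nodup_dedup _
  have hSTART : "START" ∈ U := by
    rw [hU_def, PySem.List.mem_dedup]
    exact List.mem_append_left _ ((PySem.Set.mem_update _ _ _).mpr (Or.inl (by simp)))
  have hSTOP : "STOP" ∈ U := by
    rw [hU_def, PySem.List.mem_dedup]
    exact List.mem_append_left _ ((PySem.Set.mem_update _ _ _).mpr (Or.inl (by simp)))
  have hmem : ∀ s ∈ ds, ∀ t ∈ pvSentTags s, t ∈ U := by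
    intro s hs t ht
    rw [hU_def, PySem.List.mem_dedup]
    refine List.mem_append_left _ ((PySem.Set.mem_update _ _ _).mpr (Or.inr ?_))
    rw [hflat]
    exact List.mem_flatMap.mpr ⟨s, hs, ht⟩
  -- A's dataset loop is the bump-fold over each sentence's trigram stream
  have hbodyA : (fun (d : PySem.Dict String (PySem.Dict String (PySem.Dict String Int))) sentence =>
      (List.foldl
        (fun (s : PySem.Dict String (PySem.Dict String (PySem.Dict String Int)) × String) i =>
          (s.1.modify s.2 PySem.Dict.empty fun da =>
              da.modify (PySem.List.pyGetD (pvSentTags sentence) i "") PySem.Dict.empty fun db =>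
                db.modify
                  (if i < PySem.List.len (pvSentTags sentence) - 1 then
                    PySem.List.pyGetD (pvSentTags sentence) (i + 1) ""
                  else "STOP")
                  0 fun x => x + 1,
            PySem.List.pyGetD (pvSentTags sentence) i ""))
        (d, "START") (PySem.List.pyRange 0 (PySem.List.len (pvSentTags sentence)))).1)
      = (fun d sentence => (pvTriList "START" (pvSentTags sentence)).foldl
          (fun d t => pvBump d t.1 t.2.1 t.2.2) d) := by
    funext d sentence
    have h0 := pv_loopA (pvSentTags sentence) 0 (Nat.zero_le _) d "START"
    simpa [pvBump] using h0
  rw [hbodyA]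
  have hrep := pv_ds_rep (U := U) (fun s => pvTriList "START" (pvSentTags s)) ds
    (PySem.Dict.mk (U.map (fun a => (a,
      PySem.Dict.mk (U.map (fun b => (b,
        PySem.Dict.mk (U.map (fun c => (c, (0 : Int)))))))))))
    (fun _ _ _ => 0)
    (by
      intro s hs t ht
      obtain ⟨c1, c2, c3⟩ := pv_triList_mem "START" (pvSentTags s) ht
      refine ⟨?_, hmem s hs _ c2, ?_⟩
      · rcases c1 with h | h
        · rw [h]; exact hSTART
        · exact hmem s hs _ h
      · rcases c3 with h | h
        · exact hmem s hs _ h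
        · rw [h]; exact hSTOP)
    (pv_rep_mk U hU _)
  rw [pv_render U hU _ _ hrep]
  rw [pv_render U hU _ _ (pv_rep_mk U hU
    (fun t0 t1 t2 => ((((ds.flatMap (fun s => pvTriList "START" (pvSentTags s))).filter
      (fun tri => tri.1 == t0)).filter (fun tri => tri.2.1 == t1)).filter
        (fun tri => tri.2.2 == t2)).length))]
  refine List.map_congr_left ?_
  intro a _
  refine congrArg _ (List.map_congr_left ?_)
  intro b _
  refine congrArg _ (List.map_congr_left ?_)
  intro c _
  refine congrArg _ ?_
  rw [pv_fff]
  push_cast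
  ring

-- ===== VERDICT (by name: the statement is the Claim_ definition above) =====
theorem get_trigram_counts_spec : Claim_equal_get_trigram_counts := by
  intro ds _ _
  exact pv_main ds
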